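-- pv_equiv track=rewrite | github.com/Reinsdyret/uib-notes | INF100/Oppgaver/uke7/uke_07_oppg_7.py | render_plot
-- ===== SOURCE A (Python) =====
-- def render_plot(coordinates:list) -> str:
--     """Function taking in a list of coordinates as tuples and returns a plot with the coordinates as *. With frame as #"""
--     plot = ""
--     #Find min and max coordinates
--     minX, minY = coordinates[0]
--     maxX, maxY = coordinates[0]
--     for x, y in coordinates:
--         minX = x if minX > x else minX
--         maxX = x if maxX < x else maxX
--         minY = y if minY > y else minY
--         maxY = y if maxY < y else maxY
--     #Defining width of the frame
--     width = maxX - minX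
--
--     #Making first and last row of #
--     topAndBottomFrame = "#" * (width + 3)
--
--     #Making string of points and spaces
--     points = ""
--     for y in range(maxY,minY-1,-1):
--         points += "#"
--         for x in range(minX,maxX+1):
--             points += "*" if (x,y) in coordinates else " "
--         points += "#"
--         points += "\n"
--
--     #Putting it all together
--     plot += topAndBottomFrame + "\n"
--     plot += points
--     plot += topAndBottomFrame
--
--     return plot
-- ===== SOURCE B (Python) =====
-- def render_plot(coordinates: list) -> str:
--     """Render * points inside a # frame by scattering points into a
--     pre-allocated character grid, then joining the rows."""
--     minX = min(x for x, _ in coordinates)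
--     maxX = max(x for x, _ in coordinates)
--     minY = min(y for _, y in coordinates)
--     maxY = max(y for _, y in coordinates)
--     width = maxX - minX + 1
--     height = maxY - minY + 1
--     grid = [[" "] * width for _ in range(height)]
--     for x, y in coordinates:
--         grid[maxY - y][x - minX] = "*"
--     frame = "#" * (width + 2)
--     rows = ["#" + "".join(row) + "#" for row in grid]
--     return "\n".join([frame] + rows) + "\n" + frame
-- ===== Notes on version B (the rewrite author's own statement) =====
-- stated objective: faster
-- what changed: B is point-driven instead of cell-driven: it pre-allocates a height x width grid of spaces, scatters each coordinate into it by index assignment (grid[maxY-y][x-minX]='*'), and joins the rows, instead of A's loop over every grid cell testing membership in the whole coordinate list; min/max come from min()/max() generators.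
import Mathlib
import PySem

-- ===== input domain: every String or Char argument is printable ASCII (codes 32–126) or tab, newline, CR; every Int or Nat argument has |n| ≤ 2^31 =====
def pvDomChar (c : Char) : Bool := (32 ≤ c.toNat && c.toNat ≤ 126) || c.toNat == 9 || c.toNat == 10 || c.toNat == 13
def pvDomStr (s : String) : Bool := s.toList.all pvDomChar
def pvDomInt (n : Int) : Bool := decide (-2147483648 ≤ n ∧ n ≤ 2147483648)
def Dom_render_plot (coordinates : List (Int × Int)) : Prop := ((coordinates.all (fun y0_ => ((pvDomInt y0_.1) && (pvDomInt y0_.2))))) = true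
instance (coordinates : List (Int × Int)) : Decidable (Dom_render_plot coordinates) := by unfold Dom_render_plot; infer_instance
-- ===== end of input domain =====

-- B scatters the points into a pre-allocated grid of spaces by index assignment and joins
-- the rows, instead of A's per-cell membership scan of the coordinate list (objective: faster).

-- ===== PORT A =====
-- literal port of A; strings are built as List Char and packed with String.ofList at the end
def render_plot (coordinates : List (Int × Int)) : String :=
  match coordinates with
  | [] => ""  -- Python: coordinates[0] raises IndexError here; excluded by Pre_
  | c0 :: _ =>
    let mm := coordinates.foldl
      (fun (s : Int × Int × Int × Int) (p : Int × Int) =>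
        ((if s.1 > p.1 then p.1 else s.1),
         (if s.2.1 < p.1 then p.1 else s.2.1),
         (if s.2.2.1 > p.2 then p.2 else s.2.2.1),
         (if s.2.2.2 < p.2 then p.2 else s.2.2.2)))
      (c0.1, c0.1, c0.2, c0.2)
    let minX := mm.1
    let maxX := mm.2.1
    let minY := mm.2.2.1
    let maxY := mm.2.2.2
    let width := maxX - minX
    let topAndBottomFrame : List Char := List.replicate (width + 3).toNat '#'
    let points : List Char := (PySem.List.pyRange maxY (minY - 1) (-1)).foldl
      (fun acc y =>
        ((PySem.List.pyRange minX (maxX + 1) 1).foldl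
          (fun acc2 x => acc2 ++ [if (x, y) ∈ coordinates then '*' else ' '])
          (acc ++ ['#'])) ++ ['#'] ++ ['\n'])
      []
    String.ofList (topAndBottomFrame ++ ['\n'] ++ points ++ topAndBottomFrame)

-- ===== PORT B =====
-- literal port of Source B; grid[maxY-y][x-minX] = "*" is ported with List.modify/List.set on
-- .toNat indices — exact here because both indices are provably ≥ 0 (min/max bounds), so
-- Python's negative-index wraparound and IndexError are unreachable
def render_plot_alt (coordinates : List (Int × Int)) : String :=
  match PySem.List.min? (coordinates.map Prod.fst) (fun v => v),
        PySem.List.max? (coordinates.map Prod.fst) (fun v => v),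
        PySem.List.min? (coordinates.map Prod.snd) (fun v => v),
        PySem.List.max? (coordinates.map Prod.snd) (fun v => v) with
  | some minX, some maxX, some minY, some maxY =>
    let width := maxX - minX + 1
    let height := maxY - minY + 1
    let grid0 : List (List Char) :=
      (List.range height.toNat).map (fun _ => List.replicate width.toNat ' ')
    let grid : List (List Char) := coordinates.foldl
      (fun g p => g.modify (maxY - p.2).toNat (fun row => row.set (p.1 - minX).toNat '*'))
      grid0
    let frame : List Char := List.replicate (width + 2).toNat '#'
    let rows : List (List Char) := grid.map (fun row => ['#'] ++ row ++ ['#'])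
    String.ofList (List.intercalate ['\n'] (frame :: rows) ++ ['\n'] ++ frame)
  | _, _, _, _ => ""  -- Python: min() raises ValueError on an empty list; excluded by Pre_

-- ===== PRECONDITION & SPEC =====
-- Pre_ excludes only the empty list, on which both Pythons raise (IndexError / ValueError)
def Pre_render_plot (coordinates : List (Int × Int)) : Prop := coordinates ≠ []
instance (coordinates : List (Int × Int)) : Decidable (Pre_render_plot coordinates) := by unfold Pre_render_plot; infer_instance
def pvWitness_render_plot : (List (Int × Int)) := [(0, 0), (2, 1)]

def Spec_render_plot (coordinates : List (Int × Int)) (out : String) : Prop := out = render_plot_alt coordinates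
instance (coordinates : List (Int × Int)) (out : String) : Decidable (Spec_render_plot coordinates out) := by unfold Spec_render_plot; infer_instance

-- ===== CLAIM (what is proved, stated in full; the proofs are below) =====
def Claim_equal_render_plot : Prop := ∀ (coordinates : List (Int × Int)), Dom_render_plot coordinates → Pre_render_plot coordinates → Spec_render_plot coordinates (render_plot coordinates)

-- ===== LEMMAS AND PROOFS =====

-- combined optional lookup into a grid cell
def pvGetc (g : List (List Char)) (r c : Nat) : Option Char :=
  (g[r]?).bind (fun row => row[c]?)

-- one in-place point assignment, seen through pvGetc
lemma getc_scatter_step (g : List (List Char)) (i j r c : Nat) :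
    pvGetc (g.modify i (fun row => row.set j '*')) r c
      = if i = r ∧ j = c ∧ (pvGetc g r c).isSome then some '*' else pvGetc g r c := by
  unfold pvGetc
  rw [List.getElem?_modify]
  rcases eq_or_ne i r with rfl | hir
  · cases hg : g[i]? with
    | none => simp
    | some row =>
      simp only [Option.map_some, Option.bind_some, if_true, List.getElem?_set]
      by_cases hjc : j = c
      · subst hjc
        by_cases hlt : j < row.length
        · simp [hlt]
        · simp [hlt]
      · simp [hjc]
  · simp [hir]

-- scattering all points of cs: cell (r,c) is '*' iff some point maps onto it (and the cell exists)
lemma getc_scatter (minX maxY : Int) (cs : List (Int × Int)) (g : List (List Char)) (r c : Nat) :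
    pvGetc (cs.foldl
        (fun g p => g.modify (maxY - p.2).toNat (fun row => row.set (p.1 - minX).toNat '*')) g) r c
      = if (∃ p ∈ cs, (maxY - p.2).toNat = r ∧ (p.1 - minX).toNat = c) ∧ (pvGetc g r c).isSome
        then some '*' else pvGetc g r c := by
  induction cs generalizing g with
  | nil => simp
  | cons p t ih =>
    simp only [List.foldl_cons, ih, getc_scatter_step]
    by_cases hp : (maxY - p.2).toNat = r ∧ (p.1 - minX).toNat = c
    · by_cases hs : (pvGetc g r c).isSome
      · simp [hp, hs]
      · simp [hp, hs]
    · have hstep : (if (maxY - p.2).toNat = r ∧ (p.1 - minX).toNat = c ∧ (pvGetc g r c).isSome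
          then some '*' else pvGetc g r c) = pvGetc g r c := by
        rw [if_neg]; tauto
      rw [hstep]
      by_cases hs : (pvGetc g r c).isSome
      · simp only [hs, and_true]
        congr 1
        simp only [eq_iff_iff]
        constructor
        · rintro ⟨q, hq, h⟩
          exact ⟨q, List.mem_cons_of_mem _ hq, h⟩
        · rintro ⟨q, hq, h⟩
          rcases List.mem_cons.mp hq with rfl | hq'
          · exact absurd h hp
          · exact ⟨q, hq', h⟩
      · simp [hs]

-- the blank grid, seen through pvGetc
lemma getc_blank (H W r c : Nat) :
    pvGetc ((List.range H).map (fun _ => List.replicate W ' ')) r c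
      = if r < H ∧ c < W then some ' ' else none := by
  unfold pvGetc
  by_cases hr : r < H
  · have h1 : ((List.range H).map (fun _ => List.replicate W ' '))[r]?
        = some (List.replicate W ' ') := by
      rw [List.getElem?_eq_getElem (by simpa using hr)]
      simp
    rw [h1, Option.bind_some]
    by_cases hc : c < W
    · rw [List.getElem?_eq_getElem (by simpa using hc)]
      simp [hr, hc]
    · rw [List.getElem?_eq_none (by simpa using Nat.le_of_not_lt hc)]
      simp [hr, hc]
  · rw [List.getElem?_eq_none (by simpa using Nat.le_of_not_lt hr), Option.bind_none]
    simp [hr]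

-- foldl min/max bounds
lemma foldl_min_le_init (l : List Int) (b : Int) : l.foldl min b ≤ b := by
  induction l generalizing b with
  | nil => simp
  | cons x t ih => exact le_trans (ih (min b x)) (min_le_left _ _)

lemma foldl_min_le_of_mem (l : List Int) (b a : Int) (h : a ∈ l) : l.foldl min b ≤ a := by
  induction l generalizing b with
  | nil => simp at h
  | cons x t ih =>
    rcases List.mem_cons.mp h with rfl | h
    · exact le_trans (foldl_min_le_init t (min b a)) (min_le_right _ _)
    · exact ih (min b x) h

lemma init_le_foldl_max (l : List Int) (b : Int) : b ≤ l.foldl max b := by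
  induction l generalizing b with
  | nil => simp
  | cons x t ih => exact le_trans (le_max_left _ _) (ih (max b x))

lemma le_foldl_max_of_mem (l : List Int) (b a : Int) (h : a ∈ l) : a ≤ l.foldl max b := by
  induction l generalizing b with
  | nil => simp at h
  | cons x t ih =>
    rcases List.mem_cons.mp h with rfl | h
    · exact le_trans (le_max_right _ _) (init_le_foldl_max t (max b a))
    · exact ih (max b x) h

-- A's four running extrema in one tuple are the four foldl-min/max of the projections
lemma fold4_eq (cs : List (Int × Int)) (a b c d : Int) :
    cs.foldl
      (fun (s : Int × Int × Int × Int) (p : Int × Int) =>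
        ((if s.1 > p.1 then p.1 else s.1),
         (if s.2.1 < p.1 then p.1 else s.2.1),
         (if s.2.2.1 > p.2 then p.2 else s.2.2.1),
         (if s.2.2.2 < p.2 then p.2 else s.2.2.2))) (a, b, c, d)
    = ((cs.map Prod.fst).foldl min a, (cs.map Prod.fst).foldl max b,
       (cs.map Prod.snd).foldl min c, (cs.map Prod.snd).foldl max d) := by
  induction cs generalizing a b c d with
  | nil => simp
  | cons p t ih =>
    simp only [List.foldl_cons, List.map_cons, ih]
    have h1 : (if a > p.1 then p.1 else a) = min a p.1 := by rw [min_def]; split_ifs <;> omega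
    have h2 : (if b < p.1 then p.1 else b) = max b p.1 := by rw [max_def]; split_ifs <;> omega
    have h3 : (if c > p.2 then p.2 else c) = min c p.2 := by rw [min_def]; split_ifs <;> omega
    have h4 : (if d < p.2 then p.2 else d) = max d p.2 := by rw [max_def]; split_ifs <;> omega
    rw [h1, h2, h3, h4]

-- A's row loop: append-to-string folds are the map/flatMap of the same cell function
lemma points_eq (f : Int → Int → Char) (xs ys : List Int) (acc : List Char) :
    ys.foldl (fun acc y =>
        (xs.foldl (fun acc2 x => acc2 ++ [f x y]) (acc ++ ['#'])) ++ ['#'] ++ ['\n']) acc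
      = acc ++ ys.flatMap (fun y => ['#'] ++ xs.map (fun x => f x y) ++ ['#', '\n']) := by
  induction ys generalizing acc with
  | nil => simp
  | cons y t ih =>
    simp only [List.foldl_cons, List.flatMap_cons]
    rw [PySem.List.foldl_append_singleton_eq_map, ih]
    simp

-- joining rows with a trailing newline each = intercalating newlines plus one final newline
lemma flatten_newline (L : List (List Char)) (h : L ≠ []) :
    (L.map (· ++ ['\n'])).flatten = List.intercalate ['\n'] L ++ ['\n'] := by
  induction L with
  | nil => simp at h
  | cons a t ih =>
    cases t with
    | nil => simp [List.intercalate]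
    | cons b u =>
      have := ih (by simp)
      simp only [List.map_cons, List.flatten_cons] at this ⊢
      rw [this]
      simp [List.intercalate, List.intersperse]

lemma intercalate_cons_ne_nil (a : List Char) (L : List (List Char)) (h : L ≠ []) :
    List.intercalate ['\n'] (a :: L) = a ++ ['\n'] ++ List.intercalate ['\n'] L := by
  cases L with
  | nil => simp at h
  | cons b u => simp [List.intercalate, List.intersperse]

-- the scattered grid is exactly the membership-painted grid of rows
lemma grid_eq (cs : List (Int × Int)) (minX maxX minY maxY : Int)
    (hx1 : ∀ p ∈ cs, minX ≤ p.1) (hy2 : ∀ p ∈ cs, p.2 ≤ maxY) :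
    cs.foldl
        (fun g p => g.modify (maxY - p.2).toNat (fun row => row.set (p.1 - minX).toNat '*'))
        ((List.range (maxY - minY + 1).toNat).map
          (fun _ => List.replicate (maxX - minX + 1).toNat ' '))
      = (List.range (maxY - minY + 1).toNat).map
          (fun (r : Nat) => (List.range (maxX - minX + 1).toNat).map
            (fun (c : Nat) => if ((minX + (c : Int)), (maxY - (r : Int))) ∈ cs then '*' else ' ')) := by
  set H := (maxY - minY + 1).toNat with hH
  set W := (maxX - minX + 1).toNat with hW
  set g0 : List (List Char) := (List.range H).map (fun _ => List.replicate W ' ') with hg0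
  set gf := cs.foldl
      (fun g p => g.modify (maxY - p.2).toNat (fun row => row.set (p.1 - minX).toNat '*')) g0
      with hgf
  have hget : ∀ r c : Nat, pvGetc gf r c
      = if r < H ∧ c < W then
          (if ((minX + (c : Int)), (maxY - (r : Int))) ∈ cs then some '*' else some ' ')
        else none := by
    intro r c
    rw [hgf, hg0, getc_scatter, getc_blank]
    by_cases hrc : r < H ∧ c < W
    · simp only [if_pos hrc, Option.isSome_some, and_true]
      have hiff : (∃ p ∈ cs, (maxY - p.2).toNat = r ∧ (p.1 - minX).toNat = c)
          ↔ ((minX + (c : Int)), (maxY - (r : Int))) ∈ cs := by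
        constructor
        · rintro ⟨⟨x, y⟩, hp, hr', hc'⟩
          have b1 := hx1 ⟨x, y⟩ hp
          have b2 := hy2 ⟨x, y⟩ hp
          rw [show minX + (c : Int) = x by omega, show maxY - (r : Int) = y by omega]
          exact hp
        · intro hm
          exact ⟨_, hm, by omega, by omega⟩
      simp only [hiff]
    · simp [hrc]
  have hlenf : gf.length = H := by
    rw [hgf]
    have hpres : ∀ (l : List (Int × Int)) (g : List (List Char)),
        (l.foldl (fun g p => g.modify (maxY - p.2).toNat
          (fun row => row.set (p.1 - minX).toNat '*')) g).length = g.length := by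
      intro l
      induction l with
      | nil => intro g; rfl
      | cons p t ih => intro g; rw [List.foldl_cons, ih, List.length_modify]
    rw [hpres, hg0]
    simp
  apply List.ext_getElem
  · rw [hlenf]
    simp
  · intro r hr hr'
    have hrH : r < H := by rw [hlenf] at hr; exact hr
    have hlenr : gf[r].length = W := by
      rcases Nat.lt_trichotomy gf[r].length W with hlt | heq | hgt
      · exfalso
        have h1 := hget r gf[r].length
        rw [if_pos ⟨hrH, hlt⟩] at h1
        have h2 : pvGetc gf r gf[r].length = none := by
          unfold pvGetc
          rw [List.getElem?_eq_getElem hr, Option.bind_some, List.getElem?_eq_none (le_refl _)]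
        rw [h2] at h1
        split at h1 <;> simp at h1
      · exact heq
      · exfalso
        have h1 := hget r W
        rw [if_neg (by omega)] at h1
        have h2 : (pvGetc gf r W).isSome := by
          unfold pvGetc
          rw [List.getElem?_eq_getElem hr, Option.bind_some, List.getElem?_eq_getElem hgt]
          simp
        rw [h1] at h2
        simp at h2
    apply List.ext_getElem
    · rw [hlenr]
      simp
    · intro c hc hc'
      have hcW : c < W := by rw [hlenr] at hc; exact hc
      have h1 := hget r c
      rw [if_pos ⟨hrH, hcW⟩] at h1
      have h2 : pvGetc gf r c = some (gf[r][c]) := by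
        unfold pvGetc
        rw [List.getElem?_eq_getElem hr, Option.bind_some, List.getElem?_eq_getElem hc]
      rw [h2] at h1
      simp only [List.getElem_map, List.getElem_range]
      by_cases hm : ((minX + (c : Int)), (maxY - (r : Int))) ∈ cs
      · rw [if_pos hm] at h1 ⊢
        exact Option.some.inj h1
      · rw [if_neg hm] at h1 ⊢
        exact Option.some.inj h1

-- ===== VERDICT (by name: the statement is the Claim_ definition above) =====
theorem render_plot_spec : Claim_equal_render_plot := by
  intro coordinates _ hpre
  unfold Spec_render_plot
  obtain ⟨c0, rest, rfl⟩ := List.ne_nil_iff_exists_cons.mp hpre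
  unfold render_plot render_plot_alt
  simp only [List.map_cons, PySem.List.min?_id_cons, PySem.List.max?_id_cons, fold4_eq,
    List.foldl_cons, ite_self]
  set minX := (rest.map Prod.fst).foldl min c0.1 with hminX
  set maxX := (rest.map Prod.fst).foldl max c0.1 with hmaxX
  set minY := (rest.map Prod.snd).foldl min c0.2 with hminY
  set maxY := (rest.map Prod.snd).foldl max c0.2 with hmaxY
  -- bounds on every member of the list
  have hx1 : ∀ p ∈ c0 :: rest, minX ≤ p.1 := by
    rintro p hp
    rcases List.mem_cons.mp hp with rfl | hp
    · exact foldl_min_le_init _ _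
    · exact foldl_min_le_of_mem _ _ _ (List.mem_map_of_mem hp)
  have hx2 : ∀ p ∈ c0 :: rest, p.1 ≤ maxX := by
    rintro p hp
    rcases List.mem_cons.mp hp with rfl | hp
    · exact init_le_foldl_max _ _
    · exact le_foldl_max_of_mem _ _ _ (List.mem_map_of_mem hp)
  have hy1 : ∀ p ∈ c0 :: rest, minY ≤ p.2 := by
    rintro p hp
    rcases List.mem_cons.mp hp with rfl | hp
    · exact foldl_min_le_init _ _
    · exact foldl_min_le_of_mem _ _ _ (List.mem_map_of_mem hp)
  have hy2 : ∀ p ∈ c0 :: rest, p.2 ≤ maxY := by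
    rintro p hp
    rcases List.mem_cons.mp hp with rfl | hp
    · exact init_le_foldl_max _ _
    · exact le_foldl_max_of_mem _ _ _ (List.mem_map_of_mem hp)
  have hxx : minX ≤ maxX := le_trans (hx1 c0 (by simp)) (hx2 c0 (by simp))
  have hyy : minY ≤ maxY := le_trans (hy1 c0 (by simp)) (hy2 c0 (by simp))
  -- B's scattered grid is the membership-painted grid
  have hgrid := grid_eq (c0 :: rest) minX maxX minY maxY hx1 hy2
  simp only [List.foldl_cons] at hgrid
  rw [hgrid]
  -- A's body as a flatMap of painted rows over the countdown range
  rw [points_eq (fun x y => if (x, y) ∈ c0 :: rest then '*' else ' ')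
        (PySem.List.pyRange minX (maxX + 1) 1) (PySem.List.pyRange maxY (minY - 1) (-1)) []]
  rw [PySem.List.pyRange_neg_one, PySem.List.pyRange_one]
  have hHr : (maxY - (minY - 1)).toNat = (maxY - minY + 1).toNat := by omega
  have hWr : (maxX + 1 - minX).toNat = (maxX - minX + 1).toNat := by omega
  rw [hHr, hWr]
  -- both frames are the same replicate
  have hframe : (maxX - minX + 1 + 2).toNat = (maxX - minX + 3).toNat := by omega
  rw [hframe]
  set H := (maxY - minY + 1).toNat with hH
  set W := (maxX - minX + 1).toNat with hW
  set frame : List Char := List.replicate (maxX - minX + 3).toNat '#' with hfr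
  set rowsB : List (List Char) := ((List.range H).map
      (fun (r : Nat) => (List.range W).map
        (fun (c : Nat) => if ((minX + (c : Int)), (maxY - (r : Int))) ∈ c0 :: rest then '*' else ' '))).map
    (fun row => ['#'] ++ row ++ ['#']) with hrows
  have hrowsne : rowsB ≠ [] := by
    rw [hrows]
    simp [List.range_eq_nil]
    omega
  -- the coerced ranges produced by the pyRange lemmas, as plain mapped ranges
  have hco : ∀ n : Nat, (do let a ← List.range n; pure ((a : Int))) = (List.range n).map (fun a => (a : Int)) := by
    intro n
    simp
  simp only [hco, List.flatMap_map, List.map_map, List.nil_append]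
  congr 1
  have hmidA : List.flatMap
      (fun (a : Nat) => ['#'] ++ List.map
          ((fun x => if (x, maxY - (a : Int)) ∈ c0 :: rest then '*' else ' ')
            ∘ fun (k : Nat) => minX + (k : Int))
          (List.range W) ++ ['#', '\n'])
      (List.range H)
      = List.intercalate ['\n'] rowsB ++ ['\n'] := by
    rw [← flatten_newline rowsB hrowsne, hrows, List.map_map, List.map_map, ← List.flatMap_def]
    apply List.flatMap_congr
    intro r _
    simp [Function.comp, List.map_map, List.append_assoc]
  rw [hmidA, intercalate_cons_ne_nil frame rowsB hrowsne]
  simp [List.append_assoc]
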